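-- pv_equiv track=rewrite | github.com/nds5yf/THzCAI | Research/PythonScripts/drawH.py | xcoor
-- ===== SOURCE A (Python) =====
-- def xcoor(n, li, x):
--
--     if n == 0:
--         return li
--
--     else:
--         dif = pow(2, x)
--         temp = li[:]
--         for i in range (0, len(li)):
--             temp[i] = temp[i] + dif
--         li = li + temp
--         li = li + li
--         return xcoor(n-1, li, x+1)
-- ===== SOURCE B (Python) =====
-- def xcoor(n, li, x):
--     # Closed form: the result has length len(li) * 4**n; element i is
--     # li[i % m] plus, for each of the n doubling steps k, 2**(x+k) when
--     # bit 2k of the block index i // m is set.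
--     m = len(li)
--     out = []
--     for i in range(m * 4 ** n):
--         q = i // m
--         add = 0
--         for k in range(n):
--             if (q >> (2 * k)) & 1:
--                 add += 1 << (x + k)
--         out.append(li[i % m] + add)
--     return out
-- ===== Notes on version B (the rewrite author's own statement) =====
-- stated objective: alternative
-- what changed: Replaces A's n-fold recursive list doubling (copy, bump, two concatenations per step) by a direct closed form: one pass over range(len(li)*4**n) computing each element as li[i % m] plus a sum of powers of two selected by the base-4 digits of the block index.
-- outside the precondition, e.g. on xcoor(1, [0], -1): A returns [0, 0.5, 0, 0.5], B raises ValueError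
import Mathlib
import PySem

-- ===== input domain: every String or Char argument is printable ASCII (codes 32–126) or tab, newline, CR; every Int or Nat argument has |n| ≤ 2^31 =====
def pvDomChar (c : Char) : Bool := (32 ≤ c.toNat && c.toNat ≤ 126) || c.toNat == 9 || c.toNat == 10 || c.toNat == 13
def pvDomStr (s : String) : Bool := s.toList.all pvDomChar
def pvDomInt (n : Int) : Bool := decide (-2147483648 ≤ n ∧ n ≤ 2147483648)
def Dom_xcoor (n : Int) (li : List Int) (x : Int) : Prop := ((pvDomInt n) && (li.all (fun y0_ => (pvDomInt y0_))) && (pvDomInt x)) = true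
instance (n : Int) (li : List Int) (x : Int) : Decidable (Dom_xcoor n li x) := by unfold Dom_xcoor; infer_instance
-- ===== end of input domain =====

-- B replaces A's recursive doubling by a closed-form single pass (alternative decomposition, same cost); return-value equivalence on n ≥ 0 (and x ≥ 0 when n > 0).


-- ===== PORT A =====
-- the for-loop 'temp[i] = temp[i] + dif' over a copy of li, as structural recursion
def pvBump (d : Int) : List Int → List Int
  | [] => []
  | a :: t => (a + d) :: pvBump d t

def xcoor (n : Int) (li : List Int) (x : Int) : List Int :=
  if n ≤ 0 then li   -- A returns li at n == 0; for n < 0 A never returns (outside Pre_), guard for totality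
  else
    let dif : Int := 2 ^ x.toNat   -- pow(2, x); x ≥ 0 inside Pre_, .toNat is a totality guard
    let temp := pvBump dif li
    let li1 := li ++ temp
    let li2 := li1 ++ li1
    xcoor (n - 1) li2 (x + 1)
termination_by n.toNat
decreasing_by omega

-- ===== PORT B =====
-- inner loop 'for k in range(n): if (q >> 2k) & 1: add += 1 << (x+k)'
def pvAdd (n : Nat) (x : Int) (q : Nat) : Int :=
  (List.range n).foldl
    (fun add k => if (q >>> (2 * k)) % 2 == 1 then add + 2 ^ (x + k).toNat else add) 0

def xcoor_alt (n : Int) (li : List Int) (x : Int) : List Int :=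
  let m := li.length
  (List.range (m * 4 ^ n.toNat)).foldl
    (fun out i => out ++ [li.getD (i % m) 0 + pvAdd n.toNat x (i / m)]) []

-- ===== PRECONDITION & SPEC =====
-- Pre_ excludes n < 0 (A recurses forever: RecursionError) and x < 0 with n > 0 on a
-- non-empty li (pow(2, x) is a float there, so A returns a list of floats, not ints; B raises).
def Pre_xcoor (n : Int) (li : List Int) (x : Int) : Prop := 0 ≤ n ∧ (n = 0 ∨ 0 ≤ x ∨ li = [])
instance (n : Int) (li' : List Int) (x : Int) : Decidable (Pre_xcoor n li' x) := by unfold Pre_xcoor; infer_instance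
def pvWitness_xcoor : Int × List Int × Int := (2, [0, 3], 1)

def Spec_xcoor (n : Int) (li : List Int) (x : Int) (out : List Int) : Prop := out = xcoor_alt n li x
instance (n : Int) (li : List Int) (x : Int) (out : List Int) : Decidable (Spec_xcoor n li x out) := by unfold Spec_xcoor; infer_instance

-- ===== CLAIM (what is proved, stated in full; the proofs are below) =====
def Claim_equal_xcoor : Prop := ∀ (n : Int) (li : List Int) (x : Int), Dom_xcoor n li x → Pre_xcoor n li x → Spec_xcoor n li x (xcoor n li x)

-- ===== LEMMAS AND PROOFS =====

-- recursive form of B's inner sum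
def pvAddRec : Nat → Int → Nat → Int
  | 0, _, _ => 0
  | n + 1, x, q => (if q % 2 = 1 then (2 : Int) ^ x.toNat else 0) + pvAddRec n (x + 1) (q / 4)

theorem pvAdd_foldl_eq (n : Nat) : ∀ (x : Int) (q : Nat) (a : Int),
    (List.range n).foldl
      (fun add k => if (q >>> (2 * k)) % 2 == 1 then add + 2 ^ (x + k).toNat else add) a
    = a + pvAddRec n x q := by
  induction n with
  | zero => intro x q a; simp [pvAddRec]
  | succ n ih =>
    intro x q a
    rw [List.range_succ_eq_map]
    simp only [List.foldl_cons, List.foldl_map]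
    have h1 : ∀ k : Nat, q >>> (2 * (k + 1)) = (q / 4) >>> (2 * k) := by
      intro k
      simp only [Nat.shiftRight_eq_div_pow]
      rw [Nat.div_div_eq_div_mul]
      congr 1
      ring
    have h2 : ∀ k : Nat, x + (↑k + 1 : Int) = (x + 1) + k := by intro k; ring
    have := ih (x + 1) (q / 4)
      (if (q >>> (2 * 0)) % 2 == 1 then a + 2 ^ (x + (0:Nat)).toNat else a)
    rw [show (fun (add : Int) (k : Nat) =>
          if (q >>> (2 * (k + 1))) % 2 == 1 then add + 2 ^ (x + ↑(k + 1)).toNat else add)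
        = (fun (add : Int) (k : Nat) =>
          if ((q / 4) >>> (2 * k)) % 2 == 1 then add + 2 ^ ((x + 1) + ↑k).toNat else add) by
      funext add k
      rw [h1 k]
      congr 1
      push_cast
      rw [h2 k]]
    rw [this, pvAddRec]
    simp only [Nat.shiftRight_eq_div_pow, Nat.mul_zero, Nat.pow_zero, Nat.div_one]
    push_cast
    split_ifs with hq hb hb <;> simp_all <;> ring

theorem pvAdd_eq (n : Nat) (x : Int) (q : Nat) : pvAdd n x q = pvAddRec n x q := by
  have := pvAdd_foldl_eq n x q 0
  simpa [pvAdd] using this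

-- foldl-append as map
theorem foldl_append_map {α β : Type} (f : α → β) :
    ∀ (l : List α) (init : List β),
    l.foldl (fun out i => out ++ [f i]) init = init ++ l.map f := by
  intro l
  induction l with
  | nil => intro init; simp
  | cons a t ih => intro init; simp [ih]

def pvMapForm (n : Nat) (li : List Int) (x : Int) : List Int :=
  (List.range (li.length * 4 ^ n)).map
    (fun i => li.getD (i % li.length) 0 + pvAddRec n x (i / li.length))

theorem xcoor_alt_eq_mapForm (n : Int) (li : List Int) (x : Int) :
    xcoor_alt n li x = pvMapForm n.toNat li x := by
  unfold xcoor_alt pvMapForm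
  rw [foldl_append_map]
  simp [pvAdd_eq]

theorem mapForm_zero (li : List Int) (x : Int) : pvMapForm 0 li x = li := by
  unfold pvMapForm
  apply List.ext_getElem
  · simp
  · intro i h1 h2
    simp only [List.getElem_map, List.getElem_range]
    have hi : i < li.length := h2
    rw [Nat.mod_eq_of_lt hi]
    simp [pvAddRec, List.getD_eq_getElem?_getD, List.getElem?_eq_getElem hi]

-- one step of A's transformation
def pvStep (x : Int) (li : List Int) : List Int :=
  let temp := pvBump (2 ^ x.toNat) li
  let li1 := li ++ temp
  li1 ++ li1

theorem pvBump_length (d : Int) (li : List Int) : (pvBump d li).length = li.length := by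
  induction li with
  | nil => rfl
  | cons a t ih => simp [pvBump, ih]

theorem pvBump_getD (d : Int) (li : List Int) (j : Nat) (hj : j < li.length) :
    (pvBump d li).getD j 0 = li.getD j 0 + d := by
  induction li generalizing j with
  | nil => simp at hj
  | cons a t ih =>
    cases j with
    | zero => simp [pvBump]
    | succ j =>
      simp only [pvBump, List.getD_cons_succ]
      exact ih j (by simpa using hj)

theorem pvStep_length (x : Int) (li : List Int) : (pvStep x li).length = 4 * li.length := by
  simp [pvStep, pvBump_length]; ring

theorem getD_append_left' (l1 l2 : List Int) (j : Nat) (h : j < l1.length) :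
    (l1 ++ l2).getD j 0 = l1.getD j 0 := by
  simp [List.getD_eq_getElem?_getD, List.getElem?_append_left h]

theorem getD_append_right' (l1 l2 : List Int) (j : Nat) (h : l1.length ≤ j) :
    (l1 ++ l2).getD j 0 = l2.getD (j - l1.length) 0 := by
  simp [List.getD_eq_getElem?_getD, List.getElem?_append_right h]

theorem pvStep_getD (x : Int) (li : List Int) (j : Nat) (hj : j < 4 * li.length) :
    (pvStep x li).getD j 0
      = li.getD (j % li.length) 0 + (if (j / li.length) % 2 = 1 then (2:Int) ^ x.toNat else 0) := by
  set m := li.length with hm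
  have hmpos : 0 < m := by omega
  unfold pvStep
  simp only
  set d : Int := 2 ^ x.toNat with hd
  have hlen1 : (li ++ pvBump d li).length = 2 * m := by simp [pvBump_length, hm]; ring
  by_cases h1 : j < 2 * m
  · rw [getD_append_left' _ _ _ (by omega)]
    by_cases h2 : j < m
    · rw [getD_append_left' _ _ _ (by omega)]
      have : j % m = j := Nat.mod_eq_of_lt h2
      have hdiv : j / m = 0 := Nat.div_eq_of_lt h2
      rw [this, hdiv]
      simp
    · rw [getD_append_right' _ _ _ (by omega)]
      have hjm : j - m < m := by omega
      rw [pvBump_getD _ _ _ (by omega)]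
      have hmod : j % m = j - m := by
        have : j = (j - m) + 1 * m := by omega
        rw [this]
        simp [Nat.mod_eq_of_lt hjm]
      have hdiv : j / m = 1 := by
        apply Nat.div_eq_of_lt_le
        · omega
        · omega
      rw [hmod, hdiv, ← hm]
      simp
  · rw [getD_append_right' _ _ _ (by omega)]
    set j' := j - (li ++ pvBump d li).length with hj'
    have hj'lt : j' < 2 * m := by omega
    have hj'eq : j' = j - 2 * m := by omega
    have hmodeq : j % m = j' % m := by
      have : j = j' + m * 2 := by omega
      rw [this, Nat.add_mul_mod_self_left]
    have hdiveq : j / m = j' / m + 2 := by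
      have : j = j' + m * 2 := by omega
      rw [this, Nat.add_mul_div_left _ _ hmpos]
    by_cases h2 : j' < m
    · rw [getD_append_left' _ _ _ (by omega)]
      have : j' % m = j' := Nat.mod_eq_of_lt h2
      have hdiv : j' / m = 0 := Nat.div_eq_of_lt h2
      rw [hmodeq, this, hdiveq, hdiv]
      simp
    · rw [getD_append_right' _ _ _ (by omega)]
      have hjm : j' - m < m := by omega
      rw [pvBump_getD _ _ _ (by omega)]
      have hmod : j' % m = j' - m := by
        have : j' = (j' - m) + 1 * m := by omega
        rw [this]
        simp [Nat.mod_eq_of_lt hjm]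
      have hdiv : j' / m = 1 := by
        apply Nat.div_eq_of_lt_le
        · omega
        · omega
      rw [hmodeq, hmod, hdiveq, hdiv, ← hm]
      simp

theorem mapForm_step (n : Nat) (li : List Int) (x : Int) :
    pvMapForm (n + 1) li x = pvMapForm n (pvStep x li) (x + 1) := by
  set m := li.length with hm
  rcases Nat.eq_zero_or_pos m with h0 | hmpos
  · have : li = [] := List.length_eq_zero_iff.mp (hm ▸ h0)
    subst this
    simp [pvMapForm, pvStep, pvBump]
  · apply List.ext_getElem
    · simp [pvMapForm, pvStep_length, ← hm]
      ring
    · intro i hi1 hi2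
      have hibound : i < m * 4 ^ (n + 1) := by simpa [pvMapForm] using hi1
      simp only [pvMapForm, List.getElem_map, List.getElem_range, pvStep_length, ← hm]
      have hjm : i % (4 * m) < 4 * m := Nat.mod_lt _ (by omega)
      rw [pvStep_getD x li (i % (4 * m)) (by omega)]
      have e1 : i % (4 * m) % m = i % m := Nat.mod_mod_of_dvd i ⟨4, by ring⟩
      have e2 : i % (4 * m) / m = i / m % 4 := by
        rw [show 4 * m = m * 4 by ring]
        exact Nat.mod_mul_right_div_self i m 4
      have e3 : i / m % 4 % 2 = i / m % 2 := Nat.mod_mod_of_dvd _ ⟨2, by ring⟩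
      have e4 : i / (4 * m) = i / m / 4 := by
        rw [Nat.div_div_eq_div_mul, show m * 4 = 4 * m by ring]
      rw [e1, e2, e3, e4]
      rw [pvAddRec]
      ring

theorem xcoor_eq_mapForm : ∀ (N : Nat) (n : Int) (li : List Int) (x : Int),
    n.toNat = N → 0 ≤ n → xcoor n li x = pvMapForm N li x := by
  intro N
  induction N with
  | zero =>
    intro n li x hN hn
    have : n = 0 := by omega
    subst this
    rw [xcoor, mapForm_zero]
    simp
  | succ N ih =>
    intro n li x hN hn
    have hnpos : 0 < n := by omega
    rw [xcoor]
    rw [if_neg (by omega)]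
    have := ih (n - 1) (pvStep x li) (x + 1) (by omega) (by omega)
    show xcoor (n - 1) (pvStep x li) (x + 1) = pvMapForm (N + 1) li x
    rw [this, ← mapForm_step]

-- ===== VERDICT (by name: the statement is the Claim_ definition above) =====
theorem xcoor_spec : Claim_equal_xcoor := by
  intro n li x _ hpre
  unfold Spec_xcoor
  rw [xcoor_alt_eq_mapForm]
  exact xcoor_eq_mapForm n.toNat n li x rfl hpre.1
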